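-- pv_equiv track=rewrite | github.com/xiaoella/advent_of_code_2024 | day2/day2.py | count_safe_reports
-- ===== SOURCE A (Python) =====
-- def count_safe_reports(report):
--     safe_count = 0
--     for row in report:
--         if sorted(row) == row or sorted(row, reverse=True) == row:
--             counter = 0
--             for i in range(len(row)-1):
--                 if abs(row[i+1] - row[i]) >= 1 and abs(row[i+1] - row[i]) <= 3:
--                     counter +=1
--                     if counter == len(row)-1:
--                         safe_count += 1
--     return safe_count
-- ===== SOURCE B (Python) =====
-- def count_safe_reports(report):
--     total = 0
--     for row in report:
--         if len(row) >= 2: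
--             diffs = [b - a for a, b in zip(row, row[1:])]
--             if all(1 <= d <= 3 for d in diffs) or all(-3 <= d <= -1 for d in diffs):
--                 total += 1
--     return total
-- ===== Notes on version B (the rewrite author's own statement) =====
-- stated objective: faster
-- what changed: Replaced the two per-row sorts plus counter loop (increment counter per good diff, bump the count when counter hits len-1) by one linear pass over adjacent differences checking they are all in [1,3] or all in [-3,-1].
import Mathlib
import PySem

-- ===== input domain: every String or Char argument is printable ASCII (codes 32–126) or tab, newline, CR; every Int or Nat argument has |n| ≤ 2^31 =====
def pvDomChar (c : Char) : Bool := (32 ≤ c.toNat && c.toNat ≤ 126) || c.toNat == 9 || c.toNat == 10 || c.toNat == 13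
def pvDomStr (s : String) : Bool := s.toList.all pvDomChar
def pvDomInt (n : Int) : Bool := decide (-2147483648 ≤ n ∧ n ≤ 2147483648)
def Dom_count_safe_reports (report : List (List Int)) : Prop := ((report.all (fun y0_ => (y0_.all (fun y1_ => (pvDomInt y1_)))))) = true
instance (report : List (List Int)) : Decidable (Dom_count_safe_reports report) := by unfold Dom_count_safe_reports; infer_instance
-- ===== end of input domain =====

-- B replaces A's two per-row sorts plus counter machinery by one linear pass over adjacent
-- differences (all in [1,3] or all in [-3,-1]); objective: faster (asymptotic, O(n) vs O(n log n) per row).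

-- ===== PORT A =====
-- inner loop body of A: 'if 1 <= abs(row[i+1]-row[i]) <= 3: counter += 1; if counter == len(row)-1: safe_count += 1'
-- (row[i+1], row[i] via pyGetD with an unused default: the loop index i ranges over range(len(row)-1), always in range)
def stepA (row : List Int) (st : Int × Int) (i : Int) : Int × Int :=
  if 1 ≤ |PySem.List.pyGetD row (i+1) 0 - PySem.List.pyGetD row i 0| ∧
     |PySem.List.pyGetD row (i+1) 0 - PySem.List.pyGetD row i 0| ≤ 3 then
    if st.1 + 1 = (row.length : Int) - 1 then (st.1 + 1, st.2 + 1) else (st.1 + 1, st.2)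
  else st

def rowA (safe_count : Int) (row : List Int) : Int :=
  if PySem.List.sorted row (fun x => x) = row ∨ PySem.List.sorted row (fun x => x) true = row then
    ((PySem.List.pyRange 0 ((row.length : Int) - 1)).foldl (stepA row) (0, safe_count)).2
  else safe_count

def count_safe_reports (report : List (List Int)) : Int := report.foldl rowA 0

-- ===== PORT B =====
def rowB (total : Int) (row : List Int) : Int :=
  if 2 ≤ row.length then
    let diffs := (row.zip row.tail).map (fun p => p.2 - p.1)
    if diffs.all (fun d => decide (1 ≤ d ∧ d ≤ 3)) || diffs.all (fun d => decide (-3 ≤ d ∧ d ≤ -1))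
    then total + 1 else total
  else total

def count_safe_reports_alt (report : List (List Int)) : Int := report.foldl rowB 0

-- ===== PRECONDITION & SPEC =====
def Spec_count_safe_reports (report : List (List Int)) (out : Int) : Prop := out = count_safe_reports_alt report
instance (report : List (List Int)) (out : Int) : Decidable (Spec_count_safe_reports report out) := by unfold Spec_count_safe_reports; infer_instance

-- ===== CLAIM (what is proved, stated in full; the proofs are below) =====
def Claim_equal_count_safe_reports : Prop := ∀ (report : List (List Int)), Dom_count_safe_reports report → Spec_count_safe_reports report (count_safe_reports report)

-- ===== LEMMAS AND PROOFS =====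

-- the predicate A's inner loop tests at index i
def okA (row : List Int) (i : Int) : Bool :=
  decide (1 ≤ |PySem.List.pyGetD row (i+1) 0 - PySem.List.pyGetD row i 0| ∧
          |PySem.List.pyGetD row (i+1) 0 - PySem.List.pyGetD row i 0| ≤ 3)

-- characterization of A's inner loop on an arbitrary index list
lemma loopA_char (row : List Int) (L : List Int) : ∀ c s : Int,
    L.foldl (stepA row) (c, s) =
      (c + (L.countP (okA row) : Int),
       s + if c < (row.length : Int) - 1 ∧ (row.length : Int) - 1 ≤ c + (L.countP (okA row) : Int)
           then 1 else 0) := by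
  induction L with
  | nil => intro c s; simp; omega
  | cons i L ih =>
    intro c s
    simp only [List.foldl_cons, List.countP_cons, stepA, okA]
    by_cases h : 1 ≤ |PySem.List.pyGetD row (i+1) 0 - PySem.List.pyGetD row i 0| ∧
                 |PySem.List.pyGetD row (i+1) 0 - PySem.List.pyGetD row i 0| ≤ 3
    · simp only [if_pos h, decide_eq_true h]
      by_cases h2 : c + 1 = (row.length : Int) - 1
      · rw [if_pos h2, ih]
        have hnn : (0:Int) ≤ (L.countP (okA row) : Int) := by positivity
        rw [Prod.mk.injEq]
        refine ⟨by push_cast; ring, ?_⟩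
        push_cast
        split_ifs <;> omega
      · rw [if_neg h2, ih]
        have hnn : (0:Int) ≤ (L.countP (okA row) : Int) := by positivity
        rw [Prod.mk.injEq]
        refine ⟨by push_cast; ring, ?_⟩
        push_cast
        split_ifs <;> omega
    · simp only [if_neg h, decide_eq_false h, ih]
      rw [Prod.mk.injEq]
      constructor <;> simp

-- index-form of B's "all diffs satisfy p"
lemma all_diffs_iff (row : List Int) (p : Int → Bool) :
    (((row.zip row.tail).map (fun q => q.2 - q.1)).all p = true) ↔
      ∀ i : Nat, (h : i + 1 < row.length) → p (row[i+1] - row[i]) = true := by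
  rcases row with _ | ⟨a, t⟩
  · simp
  · rw [List.all_map, List.all_eq_true]
    constructor
    · intro hall i h
      have hi : i < ((a :: t).zip (a :: t).tail).length := by
        simp only [List.length_zip, List.length_tail, List.length_cons] at *; omega
      have := hall _ (List.getElem_mem hi)
      simpa [List.getElem_zip, List.getElem_tail, Function.comp] using this
    · intro hq x hx
      obtain ⟨i, hi, rfl⟩ := List.getElem_of_mem hx
      have hlen : i + 1 < (a :: t).length := by
        simp only [List.length_zip, List.length_tail, List.length_cons] at hi ⊢; omega
      simpa [List.getElem_zip, List.getElem_tail, Function.comp] using hq i hlen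

-- "sorted(row) == row" is exactly adjacent monotonicity
lemma sorted_asc_iff (row : List Int) :
    PySem.List.sorted row (fun x => x) = row ↔
      ∀ i : Nat, (h : i + 1 < row.length) → row[i] ≤ row[i+1] := by
  constructor
  · intro hs i h
    have hp : row.Pairwise (fun a b => a ≤ b) := by
      have := PySem.List.sorted_pairwise row (fun x => x)
      rwa [hs] at this
    rw [← List.isChain_iff_pairwise] at hp
    exact (List.isChain_iff_getElem.mp hp) i h
  · intro hq
    apply PySem.List.sorted_eq_self_of_pairwise
    rw [← List.isChain_iff_pairwise]
    exact List.isChain_iff_getElem.mpr hq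

lemma sorted_desc_iff (row : List Int) :
    PySem.List.sorted row (fun x => x) true = row ↔
      ∀ i : Nat, (h : i + 1 < row.length) → row[i+1] ≤ row[i] := by
  constructor
  · intro hs i h
    have hp : row.Pairwise (fun a b : Int => b ≤ a) := by
      have := PySem.List.sorted_pairwise_rev row (fun x => x)
      rwa [hs] at this
    rw [← List.isChain_iff_pairwise] at hp
    exact (List.isChain_iff_getElem.mp hp) i h
  · intro hq
    apply PySem.List.sorted_rev_eq_self_of_pairwise
    rw [← List.isChain_iff_pairwise]
    exact List.isChain_iff_getElem.mpr hq

-- okA in index form over the range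
lemma okA_getElem (row : List Int) (i : Nat) (h : i + 1 < row.length) :
    okA row (i : Int) = decide (1 ≤ |row[i+1] - row[i]| ∧ |row[i+1] - row[i]| ≤ 3) := by
  have h0 : PySem.List.pyGetD row (i : Int) 0 = row[i] := by
    rw [PySem.List.pyGetD_eq_getElem row 0 (by positivity) (by exact_mod_cast Nat.lt_of_succ_lt h)]
    simp
  have h1 : PySem.List.pyGetD row ((i : Int) + 1) 0 = row[i+1] := by
    rw [show ((i : Int) + 1) = ((i + 1 : Nat) : Int) by push_cast; ring]
    rw [PySem.List.pyGetD_eq_getElem row 0 (by positivity) (by exact_mod_cast h)]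
    simp
  simp [okA, h0, h1]

-- the per-row step functions agree
lemma rowA_eq_rowB (s : Int) (row : List Int) : rowA s row = rowB s row := by
  cases row with
  | nil =>
      have hs : PySem.List.sorted ([] : List Int) (fun x => x) = [] :=
        PySem.List.sorted_eq_self_of_pairwise _ _ (by simp)
      rw [rowA, if_pos (Or.inl hs)]
      rw [show ((([] : List Int).length : Int) - 1) = -1 by simp]
      rw [show PySem.List.pyRange 0 (-1) = [] from by decide]
      simp [rowB]
  | cons a t =>
    have hlen1 : (((a :: t).length : Int) - 1) = ((t.length : Nat) : Int) := by simp
    have hrange : PySem.List.pyRange 0 (((a :: t).length : Int) - 1)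
        = List.map (fun k : Nat => (k : Int)) (List.range t.length) := by
      rw [hlen1, PySem.List.pyRange_zero_natCast]
    by_cases hn : 1 ≤ t.length
    · rw [rowA, rowB, hrange, loopA_char]
      set cnt := (List.map (fun k : Nat => (k : Int)) (List.range t.length)).countP (okA (a :: t)) with hcnt
      have hcle : cnt ≤ t.length := by
        have := List.countP_le_length (l := List.map (fun k : Nat => (k : Int)) (List.range t.length))
          (p := okA (a :: t))
        simpa [hcnt] using this
      -- cnt = t.length iff every adjacent difference passes A's abs test
      have hcall : cnt = t.length ↔
          ∀ i : Nat, (h : i + 1 < (a :: t).length) →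
            1 ≤ |(a :: t)[i+1] - (a :: t)[i]| ∧ |(a :: t)[i+1] - (a :: t)[i]| ≤ 3 := by
        constructor
        · intro hc i h
          have hlenL : (List.map (fun k : Nat => (k : Int)) (List.range t.length)).length
              = t.length := by simp
          have hall := List.countP_eq_length.mp (by rw [hlenL, ← hcnt]; exact hc)
          have hi : i < t.length := by simpa using h
          have hmem : (i : Int) ∈ List.map (fun k : Nat => (k : Int)) (List.range t.length) := by
            simp only [List.mem_map, List.mem_range]
            exact ⟨i, hi, rfl⟩
          have := hall _ hmem
          rw [okA_getElem (a :: t) i h] at this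
          exact of_decide_eq_true this
        · intro hall
          have h1 : ∀ x ∈ List.map (fun k : Nat => (k : Int)) (List.range t.length),
              okA (a :: t) x = true := by
            intro x hx
            simp only [List.mem_map, List.mem_range] at hx
            obtain ⟨i, hi, rfl⟩ := hx
            have h : i + 1 < (a :: t).length := by simp; omega
            rw [okA_getElem (a :: t) i h]
            exact decide_eq_true (hall i h)
          have := List.countP_eq_length.mpr h1
          simpa [hcnt] using this
      have hup : ((((a :: t).zip (a :: t).tail).map (fun p => p.2 - p.1)).all
            (fun d => decide (1 ≤ d ∧ d ≤ 3)) = true) ↔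
          (∀ i : Nat, (h : i + 1 < (a :: t).length) →
            1 ≤ (a :: t)[i+1] - (a :: t)[i] ∧ (a :: t)[i+1] - (a :: t)[i] ≤ 3) := by
        rw [all_diffs_iff]
        exact ⟨fun H i h => of_decide_eq_true (H i h), fun H i h => decide_eq_true (H i h)⟩
      have hdown : ((((a :: t).zip (a :: t).tail).map (fun p => p.2 - p.1)).all
            (fun d => decide (-3 ≤ d ∧ d ≤ -1)) = true) ↔
          (∀ i : Nat, (h : i + 1 < (a :: t).length) →
            -3 ≤ (a :: t)[i+1] - (a :: t)[i] ∧ (a :: t)[i+1] - (a :: t)[i] ≤ -1) := by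
        rw [all_diffs_iff]
        exact ⟨fun H i h => of_decide_eq_true (H i h), fun H i h => decide_eq_true (H i h)⟩
      -- the combined conditions are equivalent
      have hkey : ((PySem.List.sorted (a :: t) (fun x => x) = (a :: t) ∨
            PySem.List.sorted (a :: t) (fun x => x) true = (a :: t)) ∧
            (∀ i : Nat, (h : i + 1 < (a :: t).length) →
              1 ≤ |(a :: t)[i+1] - (a :: t)[i]| ∧ |(a :: t)[i+1] - (a :: t)[i]| ≤ 3)) ↔
          ((∀ i : Nat, (h : i + 1 < (a :: t).length) →
              1 ≤ (a :: t)[i+1] - (a :: t)[i] ∧ (a :: t)[i+1] - (a :: t)[i] ≤ 3) ∨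
           (∀ i : Nat, (h : i + 1 < (a :: t).length) →
              -3 ≤ (a :: t)[i+1] - (a :: t)[i] ∧ (a :: t)[i+1] - (a :: t)[i] ≤ -1)) := by
        rw [sorted_asc_iff, sorted_desc_iff]
        constructor
        · rintro ⟨hsort | hsort, habs⟩
          · left; intro i h
            have h1 := habs i h; have h2 := hsort i h
            rcases abs_choice ((a :: t)[i+1] - (a :: t)[i]) with he | he <;> omega
          · right; intro i h
            have h1 := habs i h; have h2 := hsort i h
            rcases abs_choice ((a :: t)[i+1] - (a :: t)[i]) with he | he <;> omega
        · rintro (hud | hud)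
          · refine ⟨Or.inl fun i h => by have := hud i h; omega, fun i h => ?_⟩
            have h1 := hud i h
            have h0 := abs_nonneg ((a :: t)[i+1] - (a :: t)[i])
            rcases abs_choice ((a :: t)[i+1] - (a :: t)[i]) with he | he <;> omega
          · refine ⟨Or.inr fun i h => by have := hud i h; omega, fun i h => ?_⟩
            have h1 := hud i h
            have h0 := abs_nonneg ((a :: t)[i+1] - (a :: t)[i])
            rcases abs_choice ((a :: t)[i+1] - (a :: t)[i]) with he | he <;> omega
      rw [if_pos (show 2 ≤ (a :: t).length by simp; omega)]
      by_cases hud : (∀ i : Nat, (h : i + 1 < (a :: t).length) →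
              1 ≤ (a :: t)[i+1] - (a :: t)[i] ∧ (a :: t)[i+1] - (a :: t)[i] ≤ 3) ∨
           (∀ i : Nat, (h : i + 1 < (a :: t).length) →
              -3 ≤ (a :: t)[i+1] - (a :: t)[i] ∧ (a :: t)[i+1] - (a :: t)[i] ≤ -1)
      · obtain ⟨hsort, habs⟩ := hkey.mpr hud
        rw [if_pos hsort]
        have hc : cnt = t.length := hcall.mpr habs
        have hcond : 0 < ((a :: t).length : Int) - 1 ∧
            ((a :: t).length : Int) - 1 ≤ 0 + (cnt : Int) := by
          simp only [List.length_cons]; push_cast; omega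
        rw [if_pos hcond]
        have hb : ((((a :: t).zip (a :: t).tail).map (fun p => p.2 - p.1)).all
              (fun d => decide (1 ≤ d ∧ d ≤ 3)) ||
            (((a :: t).zip (a :: t).tail).map (fun p => p.2 - p.1)).all
              (fun d => decide (-3 ≤ d ∧ d ≤ -1))) = true := by
          rcases hud with h | h
          · exact Bool.or_eq_true_iff.mpr (Or.inl (hup.mpr h))
          · exact Bool.or_eq_true_iff.mpr (Or.inr (hdown.mpr h))
        rw [if_pos hb]
      · have hb : ((((a :: t).zip (a :: t).tail).map (fun p => p.2 - p.1)).all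
              (fun d => decide (1 ≤ d ∧ d ≤ 3)) ||
            (((a :: t).zip (a :: t).tail).map (fun p => p.2 - p.1)).all
              (fun d => decide (-3 ≤ d ∧ d ≤ -1))) ≠ true := by
          intro hcontra
          rcases Bool.or_eq_true_iff.mp hcontra with h | h
          · exact hud (Or.inl (hup.mp h))
          · exact hud (Or.inr (hdown.mp h))
        rw [if_neg hb]
        by_cases hsort : PySem.List.sorted (a :: t) (fun x => x) = (a :: t) ∨
            PySem.List.sorted (a :: t) (fun x => x) true = (a :: t)
        · rw [if_pos hsort]
          have hcond : ¬ (0 < ((a :: t).length : Int) - 1 ∧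
              ((a :: t).length : Int) - 1 ≤ 0 + (cnt : Int)) := by
            intro hcontra
            have hc : cnt = t.length := by
              simp only [List.length_cons] at hcontra; push_cast at hcontra; omega
            exact hud (hkey.mp ⟨hsort, hcall.mp hc⟩)
          rw [if_neg hcond]
          ring
        · rw [if_neg hsort]
    · -- t = [], i.e. row = [a]: A's branch is taken but the inner loop is empty; B sees len < 2
      have ht : t = [] := List.eq_nil_of_length_eq_zero (by omega)
      subst ht
      have hs : PySem.List.sorted [a] (fun x => x) = [a] :=
        PySem.List.sorted_eq_self_of_pairwise _ _ (by simp)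
      rw [rowA, if_pos (Or.inl hs), hrange]
      simp [rowB]

theorem count_safe_reports_spec : Claim_equal_count_safe_reports := by
  intro report _
  unfold Spec_count_safe_reports count_safe_reports count_safe_reports_alt
  have : rowA = rowB := by
    funext s row; exact rowA_eq_rowB s row
  rw [this]
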